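-- pv_equiv track=rewrite | github.com/miforever/sivi | backend/src/apps/resumes/services/ai/openai/resume_processor.py | _merge_volunteer_experience
-- ===== SOURCE A (Python) =====
-- from typing import Any
--
-- def _merge_volunteer_experience(
--     existing: list[dict[str, Any]], new: list[dict[str, Any]]
-- ) -> list[dict[str, Any]]:
--     """Merge volunteer experience lists, avoiding duplicates."""
--     merged = existing.copy()
--
--     for new_volunteer in new:
--         # Check if this volunteer experience already exists
--         exists = any(
--             vol.get("organization", "").lower() == new_volunteer.get("organization", "").lower()
--             and vol.get("position", "").lower() == new_volunteer.get("position", "").lower()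
--             for vol in merged
--         )
--
--         if not exists:
--             merged.append(new_volunteer)
--
--     # Sort by start date (most recent first)
--     return sorted(merged, key=lambda x: x.get("start_date", ""), reverse=True)
-- ===== SOURCE B (Python) =====
-- from typing import Any
--
-- def _merge_volunteer_experience(
--     existing: list[dict[str, Any]], new: list[dict[str, Any]]
-- ) -> list[dict[str, Any]]:
--     """Merge: index the new items by key (first occurrence wins), subtract the
--     keys already present in existing, concatenate, sort by start date desc."""
--     chosen: dict[tuple[str, str], dict[str, Any]] = {}
--     for nv in new:
--         chosen.setdefault(
--             (nv.get("organization", "").lower(), nv.get("position", "").lower()), nv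
--         )
--     for vol in existing:
--         chosen.pop(
--             (vol.get("organization", "").lower(), vol.get("position", "").lower()), None
--         )
--     merged = existing + list(chosen.values())
--     return sorted(merged, key=lambda x: x.get("start_date", ""), reverse=True)
-- ===== Notes on version B (the rewrite author's own statement) =====
-- stated objective: alternative
-- what changed: Instead of scanning the growing merged list per new item, B indexes new by a dict keyed on (org.lower(), position.lower()) via setdefault (first occurrence wins), pops the keys present in existing, and concatenates existing with the surviving dict values before sorting.
import Mathlib
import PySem

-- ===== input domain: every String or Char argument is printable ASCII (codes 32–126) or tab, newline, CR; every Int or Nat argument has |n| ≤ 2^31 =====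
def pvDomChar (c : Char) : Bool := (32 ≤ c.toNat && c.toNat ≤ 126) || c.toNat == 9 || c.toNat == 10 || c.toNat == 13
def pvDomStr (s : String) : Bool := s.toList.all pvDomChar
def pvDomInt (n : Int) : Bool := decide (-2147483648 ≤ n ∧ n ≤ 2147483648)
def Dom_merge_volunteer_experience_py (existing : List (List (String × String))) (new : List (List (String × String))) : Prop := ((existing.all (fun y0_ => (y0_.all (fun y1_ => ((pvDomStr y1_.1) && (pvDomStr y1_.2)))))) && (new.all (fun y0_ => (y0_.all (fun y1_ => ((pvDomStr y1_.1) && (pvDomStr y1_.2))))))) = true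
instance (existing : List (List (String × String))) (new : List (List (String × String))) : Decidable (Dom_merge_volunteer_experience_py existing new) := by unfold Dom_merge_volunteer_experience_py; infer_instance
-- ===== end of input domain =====

-- B replaces A's per-new-item scan of the growing merged list by a staged dict
-- pass: index new by key with setdefault, pop existing keys, concatenate, sort.


-- ===== PORT A =====
def merge_volunteer_experience_py (existing : List (List (String × String))) (new : List (List (String × String))) : List (List (String × String)) :=
  let merged := new.foldl (fun merged nv =>
    let exists_ := merged.any (fun vol =>
      (PySem.Str.lower (PySem.Dict.getD ⟨vol⟩ "organization" "") ==
         PySem.Str.lower (PySem.Dict.getD ⟨nv⟩ "organization" "")) &&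
      (PySem.Str.lower (PySem.Dict.getD ⟨vol⟩ "position" "") ==
         PySem.Str.lower (PySem.Dict.getD ⟨nv⟩ "position" "")))
    if !exists_ then merged ++ [nv] else merged) existing
  PySem.List.sorted merged (fun x => PySem.Dict.getD ⟨x⟩ "start_date" "") true

-- ===== PORT B =====
-- B-side helper: the dedup key (org.lower(), position.lower())
def pvKey (v : List (String × String)) : String × String :=
  (PySem.Str.lower (PySem.Dict.getD ⟨v⟩ "organization" ""),
   PySem.Str.lower (PySem.Dict.getD ⟨v⟩ "position" ""))

def merge_volunteer_experience_py_alt (existing : List (List (String × String))) (new : List (List (String × String))) : List (List (String × String)) :=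
  let chosen : PySem.Dict (String × String) (List (String × String)) :=
    new.foldl (fun d nv => PySem.Dict.setdefault d (pvKey nv) nv) ⟨[]⟩
  -- .pop(key, None) with the value discarded removes the key: Dict.erase
  let chosen := existing.foldl (fun d vol => PySem.Dict.erase d (pvKey vol)) chosen
  let merged := existing ++ PySem.Dict.values chosen
  PySem.List.sorted merged (fun x => PySem.Dict.getD ⟨x⟩ "start_date" "") true

-- ===== PRECONDITION & SPEC =====
def Spec_merge_volunteer_experience_py (existing : List (List (String × String))) (new : List (List (String × String))) (out : List (List (String × String))) : Prop := out = merge_volunteer_experience_py_alt existing new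
instance (existing : List (List (String × String))) (new : List (List (String × String))) (out : List (List (String × String))) : Decidable (Spec_merge_volunteer_experience_py existing new out) := by unfold Spec_merge_volunteer_experience_py; infer_instance

-- ===== CLAIM (what is proved, stated in full; the proofs are below) =====
def Claim_equal_merge_volunteer_experience_py : Prop := ∀ (existing : List (List (String × String))) (new : List (List (String × String))), Dom_merge_volunteer_experience_py existing new → Spec_merge_volunteer_experience_py existing new (merge_volunteer_experience_py existing new)

-- ===== LEMMAS AND PROOFS =====

-- the (key, item) pairs A's loop appends: first occurrence per key among `new`,
-- keys not already in the seen list s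
def pvFirstOcc (new : List (List (String × String))) (s : List (String × String)) :
    List ((String × String) × List (String × String)) :=
  match new with
  | [] => []
  | nv :: rest =>
      if pvKey nv ∈ s then pvFirstOcc rest s
      else (pvKey nv, nv) :: pvFirstOcc rest (pvKey nv :: s)

lemma pvFirstOcc_congr (new : List (List (String × String)))
    (s t : List (String × String)) (h : ∀ k, k ∈ s ↔ k ∈ t) :
    pvFirstOcc new s = pvFirstOcc new t := by
  induction new generalizing s t with
  | nil => rfl
  | cons nv rest ih =>
    simp only [pvFirstOcc]
    by_cases hm : pvKey nv ∈ s
    · rw [if_pos hm, if_pos ((h _).mp hm)]; exact ih s t h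
    · rw [if_neg hm, if_neg (fun hc => hm ((h _).mpr hc))]
      exact congrArg _ (ih _ _ (by intro k; simp [h k]))

-- restricting by an extra prefix of seen keys = filtering the result
lemma pvFirstOcc_append (new : List (List (String × String)))
    (s : List (String × String)) :
    ∀ t, pvFirstOcc new (s ++ t) =
      (pvFirstOcc new t).filter (fun p => decide (p.1 ∉ s)) := by
  induction new with
  | nil => intro t; rfl
  | cons nv rest ih =>
    intro t
    simp only [pvFirstOcc, List.mem_append]
    by_cases hs : pvKey nv ∈ s
    · rw [if_pos (Or.inl hs)]
      by_cases ht : pvKey nv ∈ t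
      · rw [if_pos ht]; exact ih t
      · rw [if_neg ht, List.filter_cons_of_neg (by simpa using hs)]
        rw [pvFirstOcc_congr rest (s ++ t) (s ++ (pvKey nv :: t))
              (by intro k
                  simp only [List.mem_append, List.mem_cons]
                  constructor
                  · rintro (h | h)
                    exacts [Or.inl h, Or.inr (Or.inr h)]
                  · rintro (h | rfl | h)
                    exacts [Or.inl h, Or.inl hs, Or.inr h])]
        exact ih (pvKey nv :: t)
    · by_cases ht : pvKey nv ∈ t
      · rw [if_pos (Or.inr ht), if_pos ht]; exact ih t
      · rw [if_neg (by tauto), if_neg ht, List.filter_cons_of_pos (by simpa using hs)]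
        rw [pvFirstOcc_congr rest (pvKey nv :: (s ++ t)) (s ++ (pvKey nv :: t))
              (by intro k; simp; tauto)]
        exact congrArg _ (ih (pvKey nv :: t))

-- A's duplicate test is membership of the key in the merged list's keys
lemma pv_any_eq_mem (merged : List (List (String × String)))
    (nv : List (String × String)) :
    (merged.any (fun vol =>
      (PySem.Str.lower (PySem.Dict.getD ⟨vol⟩ "organization" "") ==
         PySem.Str.lower (PySem.Dict.getD ⟨nv⟩ "organization" "")) &&
      (PySem.Str.lower (PySem.Dict.getD ⟨vol⟩ "position" "") ==
         PySem.Str.lower (PySem.Dict.getD ⟨nv⟩ "position" "")))) =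
    decide (pvKey nv ∈ merged.map pvKey) := by
  by_cases h : pvKey nv ∈ merged.map pvKey
  · rw [decide_eq_true h, List.any_eq_true]
    rcases List.mem_map.mp h with ⟨vol, hv, hk⟩
    refine ⟨vol, hv, ?_⟩
    simp only [pvKey, Prod.mk.injEq] at hk
    simp [hk.1, hk.2]
  · rw [decide_eq_false h, List.any_eq_false]
    intro vol hv hc
    simp only [Bool.and_eq_true, beq_iff_eq] at hc
    exact h (List.mem_map.mpr ⟨vol, hv, by simp [pvKey, hc.1, hc.2]⟩)

-- A's fold in key-membership form
lemma pv_foldA' (new : List (List (String × String))) :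
    ∀ merged, new.foldl (fun merged nv =>
      if pvKey nv ∈ merged.map pvKey then merged else merged ++ [nv]) merged =
    merged ++ (pvFirstOcc new (merged.map pvKey)).map (·.2) := by
  induction new with
  | nil => intro merged; simp [pvFirstOcc]
  | cons nv rest ih =>
    intro merged
    rw [List.foldl_cons]
    simp only [pvFirstOcc]
    by_cases h : pvKey nv ∈ merged.map pvKey
    · rw [if_pos h, if_pos h]; exact ih merged
    · rw [if_neg h, if_neg h, ih (merged ++ [nv])]
      rw [pvFirstOcc_congr rest ((merged ++ [nv]).map pvKey)
            (pvKey nv :: merged.map pvKey) (by intro k; simp [or_comm])]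
      simp

-- A's fold appends exactly the pvFirstOcc items
lemma pv_foldA (new : List (List (String × String))) :
    ∀ merged, new.foldl (fun merged nv =>
      let exists_ := merged.any (fun vol =>
        (PySem.Str.lower (PySem.Dict.getD ⟨vol⟩ "organization" "") ==
           PySem.Str.lower (PySem.Dict.getD ⟨nv⟩ "organization" "")) &&
        (PySem.Str.lower (PySem.Dict.getD ⟨vol⟩ "position" "") ==
           PySem.Str.lower (PySem.Dict.getD ⟨nv⟩ "position" "")))
      if !exists_ then merged ++ [nv] else merged) merged =
    merged ++ (pvFirstOcc new (merged.map pvKey)).map (·.2) := by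
  have hf : (fun (merged : List (List (String × String))) nv =>
      let exists_ := merged.any (fun vol =>
        (PySem.Str.lower (PySem.Dict.getD ⟨vol⟩ "organization" "") ==
           PySem.Str.lower (PySem.Dict.getD ⟨nv⟩ "organization" "")) &&
        (PySem.Str.lower (PySem.Dict.getD ⟨vol⟩ "position" "") ==
           PySem.Str.lower (PySem.Dict.getD ⟨nv⟩ "position" "")))
      if !exists_ then merged ++ [nv] else merged) =
      (fun merged nv =>
        if pvKey nv ∈ merged.map pvKey then merged else merged ++ [nv]) := by
    funext merged nv
    simp only [pv_any_eq_mem]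
    by_cases h : pvKey nv ∈ merged.map pvKey <;> simp [h]
  intro merged
  rw [hf]
  exact pv_foldA' new merged

-- B's setdefault fold appends exactly the pvFirstOcc pairs to the items list
lemma pv_foldB (new : List (List (String × String))) :
    ∀ (d : PySem.Dict (String × String) (List (String × String))),
    (new.foldl (fun d nv => PySem.Dict.setdefault d (pvKey nv) nv) d).items =
      d.items ++ pvFirstOcc new (d.items.map (·.1)) := by
  induction new with
  | nil => intro d; simp [pvFirstOcc]
  | cons nv rest ih =>
    intro d
    rw [List.foldl_cons]
    simp only [pvFirstOcc]
    by_cases h : pvKey nv ∈ d.items.map (·.1)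
    · have hc : d.contains (pvKey nv) = true := by
        rw [PySem.Dict.contains_iff_mem_keys]; exact h
      rw [if_pos h, PySem.Dict.setdefault_of_contains d nv hc]
      exact ih d
    · have hc : d.contains (pvKey nv) = false := by
        rw [Bool.eq_false_iff]
        intro hcc
        exact h ((PySem.Dict.contains_iff_mem_keys _ _).mp hcc)
      rw [if_neg h]
      have hsd : PySem.Dict.setdefault d (pvKey nv) nv =
          ⟨d.items ++ [(pvKey nv, nv)]⟩ := by
        simp [PySem.Dict.setdefault, hc]
      rw [hsd, ih ⟨d.items ++ [(pvKey nv, nv)]⟩]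
      rw [show (PySem.Dict.mk (κ := String × String)
            (d.items ++ [(pvKey nv, nv)])).items = d.items ++ [(pvKey nv, nv)] from rfl]
      rw [pvFirstOcc_congr rest ((d.items ++ [(pvKey nv, nv)]).map (·.1))
            (pvKey nv :: d.items.map (·.1)) (by intro k; simp; tauto)]
      simp

-- B's erase fold filters the items list by the erased keys
lemma pv_foldErase (l : List (List (String × String))) :
    ∀ (d : PySem.Dict (String × String) (List (String × String))),
    (l.foldl (fun d vol => PySem.Dict.erase d (pvKey vol)) d).items =
      d.items.filter (fun p => decide (p.1 ∉ l.map pvKey)) := by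
  induction l with
  | nil => intro d; simp
  | cons v rest ih =>
    intro d
    rw [List.foldl_cons, ih (PySem.Dict.erase d (pvKey v))]
    simp only [PySem.Dict.erase, List.filter_filter]
    apply List.filter_congr
    intro p _
    by_cases h1 : p.1 = pvKey v <;> simp [h1]

-- ===== VERDICT (by name: the statement is the Claim_ definition above) =====
theorem merge_volunteer_experience_py_spec : Claim_equal_merge_volunteer_experience_py := by
  intro existing new _
  unfold Spec_merge_volunteer_experience_py merge_volunteer_experience_py merge_volunteer_experience_py_alt
  simp only [PySem.Dict.values]
  rw [pv_foldA, pv_foldErase, pv_foldB]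
  have h := pvFirstOcc_append new (existing.map pvKey) []
  rw [List.append_nil] at h
  rw [show (PySem.Dict.mk (κ := String × String)
        (ν := List (String × String)) []).items = [] from rfl]
  rw [show pvFirstOcc new ((List.nil (α := (String × String) × List (String × String))).map (·.1)) = pvFirstOcc new [] from rfl]
  rw [List.nil_append, h]
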